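-- pv_equiv track=rewrite | github.com/Kronostheus/simpleML | unsupervised/yake.py | _remove_starting_capitalization
-- ===== SOURCE A (Python) =====
-- def _remove_starting_capitalization(sentences):
--     """
--     Removes capitalization of first word in sentence.
--     Might maintain capitalization if and only if it finds another capitalized occurrence within the text, excluding
--     other sentence starting words.
--
--     :param sentences: list[list[words]] -> list of sentences that have been tokenized into words
--     :return: list[list[word]] -> same list as input but with sentence staring words in lowercase
--     """
--
--     # Beginning word of each sentence
--     starting = [sentence[0] for sentence in sentences]
--
--     for starting_word in starting:
--
--         # Starting word is an acronym with at least two uppercase letters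
--         if starting_word.isupper() and len(starting_word) > 1:
--             continue
--
--         # Check if there is at least one occurrence of the capitalized word within any sentence other than at start
--         if not any(starting_word in sentence[1:] for sentence in sentences):
--
--             # If there are no occurrences that satisfy condition then lowercase the starting word
--             for sentence in sentences:
--                 if sentence[0] == starting_word:
--                     sentence[0] = sentence[0].lower()
--
--     return sentences
-- ===== SOURCE B (Python) =====
-- def _remove_starting_capitalization(sentences):
--     # Same return value and same in-place mutation as A; one direct pass with a
--     # precomputed set of all non-initial words instead of A's rescan per starting word.
--     firsts = [sentence[0] for sentence in sentences]
--     tail_words = set()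
--     for sentence in sentences:
--         tail_words.update(sentence[1:])
--     for sentence, word in zip(sentences, firsts):
--         if not (word.isupper() and len(word) > 1) and word not in tail_words:
--             sentence[0] = word.lower()
--     return sentences
-- ===== Notes on version B (the rewrite author's own statement) =====
-- stated objective: faster
-- what changed: B precomputes one set of all non-initial words and lowercases each sentence's first word in a single direct pass, replacing A's per-starting-word rescan of all sentences (the nested any/inner mutation loops disappear).
import Mathlib
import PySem

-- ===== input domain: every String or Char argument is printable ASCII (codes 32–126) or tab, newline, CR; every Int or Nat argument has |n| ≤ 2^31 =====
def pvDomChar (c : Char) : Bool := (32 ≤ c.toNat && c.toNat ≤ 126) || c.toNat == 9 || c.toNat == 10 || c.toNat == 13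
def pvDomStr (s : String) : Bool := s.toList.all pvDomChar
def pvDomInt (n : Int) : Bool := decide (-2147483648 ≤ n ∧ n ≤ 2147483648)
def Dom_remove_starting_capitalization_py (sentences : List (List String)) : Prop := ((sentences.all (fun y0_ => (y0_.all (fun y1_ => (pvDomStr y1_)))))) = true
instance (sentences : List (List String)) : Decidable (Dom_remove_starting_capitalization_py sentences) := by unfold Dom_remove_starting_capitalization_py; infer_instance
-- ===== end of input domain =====

-- B replaces A's nested per-starting-word rescan of all sentences by one precomputed set of all
-- non-initial words plus a single direct pass over the sentences (asymptotically fewer scans);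
-- both A and B mutate `sentences` in place in Python in the same way, the theorems are about the return value.

-- ===== PORT A =====
-- `w.isupper()`: at least one cased character and no lowercase one — hand-ported, exact on the ASCII domain
def pyStrIsupper (w : String) : Bool :=
  w.toList.any PySem.Chars.isupper && w.toList.all (fun c => !PySem.Chars.islower c)

-- body of A's outer loop for one starting word w, acting on the current sentences
def pyAStep (sents : List (List String)) (w : String) : List (List String) :=
  -- "Starting word is an acronym with at least two uppercase letters"
  if pyStrIsupper w && decide (1 < PySem.Str.len w) then sents
  -- "any(starting_word in sentence[1:] for sentence in sentences)"
  else if sents.any (fun sentence => (PySem.List.slice sentence (some 1) none).contains w) then sents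
  -- "for sentence in sentences: if sentence[0] == starting_word: sentence[0] = sentence[0].lower()"
  else sents.map (fun sentence =>
    match sentence with
    | [] => []   -- Python already raised IndexError at `starting`; unreachable under Pre_
    | h :: t => if h == w then PySem.Str.lower h :: t else h :: t)

def remove_starting_capitalization_py (sentences : List (List String)) : List (List String) :=
  -- starting = [sentence[0] for sentence in sentences]  (IndexError on an empty sentence → Pre_)
  let starting := sentences.map (fun sentence => (PySem.List.pyGet? sentence 0).getD "")
  starting.foldl pyAStep sentences

-- ===== PORT B =====
def remove_starting_capitalization_py_alt (sentences : List (List String)) : List (List String) :=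
  -- firsts = [sentence[0] for sentence in sentences]  (IndexError on an empty sentence → Pre_)
  let firsts := sentences.map (fun sentence => (PySem.List.pyGet? sentence 0).getD "")
  -- tail_words = set(); for sentence in sentences: tail_words.update(sentence[1:])
  let tailWords : PySem.Set String :=
    sentences.foldl (fun acc sentence => PySem.Set.update acc (PySem.List.slice sentence (some 1) none)) PySem.Set.empty
  -- for sentence, word in zip(sentences, firsts): …  (sentence[0] = word.lower())
  (sentences.zip firsts).map (fun p =>
    if !(pyStrIsupper p.2 && decide (1 < PySem.Str.len p.2)) && !(PySem.Set.contains tailWords p.2) then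
      PySem.List.pySetD p.1 0 (PySem.Str.lower p.2)
    else p.1)

-- ===== PRECONDITION & SPEC =====
-- Pre_ excludes exactly the inputs containing an empty sentence, on which both Pythons raise IndexError.
def Pre_remove_starting_capitalization_py (sentences : List (List String)) : Prop :=
  (sentences.all (fun sentence => !sentence.isEmpty)) = true
instance (sentences : List (List String)) : Decidable (Pre_remove_starting_capitalization_py sentences) := by unfold Pre_remove_starting_capitalization_py; infer_instance

def pvWitness_remove_starting_capitalization_py : List (List String) := [["Hello", "World"], ["hi", "World"]]

def Spec_remove_starting_capitalization_py (sentences : List (List String)) (out : List (List String)) : Prop := out = remove_starting_capitalization_py_alt sentences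
instance (sentences : List (List String)) (out : List (List String)) : Decidable (Spec_remove_starting_capitalization_py sentences out) := by unfold Spec_remove_starting_capitalization_py; infer_instance

-- ===== CLAIM (what is proved, stated in full; the proofs are below) =====
def Claim_equal_remove_starting_capitalization_py : Prop := ∀ (sentences : List (List String)), Dom_remove_starting_capitalization_py sentences → Pre_remove_starting_capitalization_py sentences → Spec_remove_starting_capitalization_py sentences (remove_starting_capitalization_py sentences)


-- ===== LEMMAS AND PROOFS =====

-- the per-word condition under which A (and B) lowercase a first word, as a Bool on the ORIGINAL sentences
def pvP (S : List (List String)) (w : String) : Bool :=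
  !(pyStrIsupper w && decide (1 < PySem.Str.len w)) && !(S.any (fun s => s.tail.contains w))

-- the cumulative effect of A's outer loop after processing the starting words ws
def pvG (S : List (List String)) (ws : List String) (s : List String) : List String :=
  match s with
  | [] => []
  | h :: t => if pvP S h && ws.contains h then PySem.Str.lower h :: t else h :: t

theorem pvLowerChar_idem (c : Char) :
    PySem.Chars.lowerChar (PySem.Chars.lowerChar c) = PySem.Chars.lowerChar c := by
  unfold PySem.Chars.lowerChar PySem.Chars.isupper
  by_cases h : (decide ('A' ≤ c) && decide (c ≤ 'Z')) = true
  · rw [if_pos h]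
    simp only [Bool.and_eq_true, decide_eq_true_eq] at h
    have h1 : 65 ≤ c.toNat := Nat.succ_le_of_lt h.1
    have h2 : c.toNat ≤ 90 := Fin.mk_le_mk.mp h.2
    have hv : (Char.ofNat (c.toNat + 32)).toNat = c.toNat + 32 := by
      rw [Char.toNat_ofNat, if_pos (Or.inl (by omega))]
    have hfalse : ¬ ((decide ('A' ≤ Char.ofNat (c.toNat + 32)) && decide (Char.ofNat (c.toNat + 32) ≤ 'Z')) = true) := by
      simp only [Bool.and_eq_true, decide_eq_true_eq]
      rintro ⟨-, hz⟩
      have h90 : (Char.ofNat (c.toNat + 32)).toNat ≤ 90 := Fin.mk_le_mk.mp hz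
      rw [hv] at h90
      omega
    rw [if_neg hfalse]
  · simp [h]

theorem pvLower_idem (s : String) :
    PySem.Str.lower (PySem.Str.lower s) = PySem.Str.lower s := by
  unfold PySem.Str.lower PySem.Chars.lower
  rw [String.toList_ofList, List.map_map]
  congr 1
  apply List.map_congr_left
  intro c _
  exact pvLowerChar_idem c

theorem pvTail_pvG (S : List (List String)) (ws : List String) (s : List String) :
    (pvG S ws s).tail = s.tail := by
  cases s with
  | nil => rfl
  | cons h t => simp only [pvG]; split <;> rfl

theorem pvSet_add_contains (s : PySem.Set String) (x w : String) :
    (PySem.Set.add s x).contains w = (s.contains w || w == x) := by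
  unfold PySem.Set.add PySem.Set.contains
  by_cases hw : w = x
  · subst hw
    by_cases hx : List.contains s w = true
    · rw [if_pos hx]
      have hmem : w ∈ s := by simpa using hx
      simp [hmem]
    · rw [if_neg hx]; simp
  · by_cases hx : List.contains s x = true
    · rw [if_pos hx]; simp [hw]
    · rw [if_neg hx]; simp [hw]

theorem pvSet_update_contains (acc : PySem.Set String) (l : List String) (w : String) :
    (PySem.Set.update acc l).contains w = (acc.contains w || l.contains w) := by
  unfold PySem.Set.update
  induction l generalizing acc with
  | nil => simp
  | cons x l ih =>
      rw [List.foldl_cons, ih, pvSet_add_contains]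
      by_cases hw : w = x
      · simp [hw, Bool.or_assoc]
      · have hb : (w == x) = false := by simp [hw]
        simp [hb, hw, Bool.or_assoc]

theorem pvTailWords_contains (S : List (List String)) (acc : PySem.Set String) (w : String) :
    (S.foldl (fun a s => PySem.Set.update a s.tail) acc).contains w
      = (acc.contains w || S.any (fun s => s.tail.contains w)) := by
  induction S generalizing acc with
  | nil => simp
  | cons s S ih =>
      rw [List.foldl_cons, List.any_cons, ih, pvSet_update_contains, Bool.or_assoc]

theorem pvStep_pvG (S : List (List String)) (ws : List String) (w : String) :
    pyAStep (S.map (pvG S ws)) w = S.map (pvG S (ws ++ [w])) := by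
  have hany : (S.map (pvG S ws)).any (fun s => (PySem.List.slice s (some 1) none).contains w)
      = S.any (fun s => s.tail.contains w) := by
    rw [List.any_map]
    congr 1
    funext s
    simp [Function.comp, PySem.List.slice_from_one, pvTail_pvG]
  unfold pyAStep
  rw [hany]
  by_cases hacr : (pyStrIsupper w && decide (1 < PySem.Str.len w)) = true
  · rw [if_pos hacr]
    apply List.map_congr_left
    intro s _
    cases s with
    | nil => rfl
    | cons h t =>
        simp only [pvG]
        by_cases hw : h = w
        · have hp : pvP S h = false := by rw [hw]; unfold pvP; rw [hacr]; rfl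
          simp [hp]
        · have hca : (ws ++ [w]).contains h = ws.contains h := by
            simp [List.mem_append, hw]
          rw [hca]
  · rw [if_neg hacr]
    by_cases hA : S.any (fun s => s.tail.contains w) = true
    · rw [if_pos hA]
      apply List.map_congr_left
      intro s _
      cases s with
      | nil => rfl
      | cons h t =>
          simp only [pvG]
          by_cases hw : h = w
          · have hp : pvP S h = false := by rw [hw]; unfold pvP; rw [hA]; simp
            simp [hp]
          · have hca : (ws ++ [w]).contains h = ws.contains h := by
              simp [List.mem_append, hw]
            rw [hca]
    · rw [if_neg hA]
      rw [List.map_map]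
      apply List.map_congr_left
      intro s _
      simp only [Bool.not_eq_true] at hacr hA
      have hPw : pvP S w = true := by unfold pvP; rw [hacr, hA]; rfl
      cases s with
      | nil => rfl
      | cons h t =>
          simp only [Function.comp, pvG]
          by_cases hc : (pvP S h && ws.contains h) = true
          · rw [if_pos hc]
            have hc' : (pvP S h && (ws ++ [w]).contains h) = true := by
              rw [Bool.and_eq_true] at hc ⊢
              refine ⟨hc.1, ?_⟩
              have hm : h ∈ ws := by simpa using hc.2
              simp [List.mem_append, hm]
            rw [if_pos hc']
            by_cases hlw : PySem.Str.lower h = w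
            · have hb : (PySem.Str.lower h == w) = true := by simp [hlw]
              simp only [hb, if_true]
              rw [pvLower_idem]
            · have hb : (PySem.Str.lower h == w) = false := by simp [hlw]
              simp [hb]
          · rw [if_neg hc]
            by_cases hw : h = w
            · have hc' : (pvP S h && (ws ++ [w]).contains h) = true := by
                rw [Bool.and_eq_true]
                exact ⟨hw ▸ hPw, by simp [hw]⟩
              have hb : (h == w) = true := by simp [hw]
              simp only [hc', if_true, hb]
            · have hb : (h == w) = false := by simp [hw]
              have hc' : (pvP S h && (ws ++ [w]).contains h) = false := by
                cases hp : pvP S h with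
                | false => rfl
                | true =>
                    have hws : ws.contains h = false := by
                      cases hws : ws.contains h with
                      | false => rfl
                      | true => exact absurd (by rw [hp, hws]; rfl) hc
                    have hnot : h ∉ ws := by simpa using hws
                    simp [List.mem_append, hnot, hw]
              rw [if_neg (by rw [hc']; simp)]
              simp [hb]

theorem pvFoldl_pvG (S : List (List String)) (ws : List String) :
    ws.foldl pyAStep S = S.map (pvG S ws) := by
  induction ws using List.reverseRecOn with
  | nil =>
      rw [List.foldl_nil]
      symm
      conv_rhs => rw [← List.map_id S]
      apply List.map_congr_left
      intro s _
      cases s <;> simp [pvG]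
  | append_singleton ws w ih =>
      rw [List.foldl_append, List.foldl_cons, List.foldl_nil, ih, pvStep_pvG]

-- ===== VERDICT (by name: the statement is the Claim_ definition above) =====
theorem remove_starting_capitalization_py_spec : Claim_equal_remove_starting_capitalization_py := by
  intro S _hDom hPre
  unfold Pre_remove_starting_capitalization_py at hPre
  unfold Spec_remove_starting_capitalization_py
  unfold remove_starting_capitalization_py remove_starting_capitalization_py_alt
  simp only []
  rw [pvFoldl_pvG]
  have hz : S.zip (S.map (fun sentence => (PySem.List.pyGet? sentence 0).getD "")) =
      S.map (fun s => (s, (PySem.List.pyGet? s 0).getD "")) := by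
    nth_rewrite 1 [← List.map_id S]
    rw [List.zip_map']
    simp only [id_eq]
  rw [hz, List.map_map]
  apply List.map_congr_left
  intro s hs
  have hne : s ≠ [] := by
    intro hnil
    rw [List.all_eq_true] at hPre
    have := hPre s hs
    simp [hnil] at this
  obtain ⟨h, t, rfl⟩ : ∃ h t, s = h :: t := by
    cases s with
    | nil => exact absurd rfl hne
    | cons h t => exact ⟨h, t, rfl⟩
  have hf0 : (PySem.List.pyGet? (h :: t) 0).getD "" = h := by
    simp [pysem]
  have hmem : (S.map (fun sentence => (PySem.List.pyGet? sentence 0).getD "")).contains h = true := by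
    have : h ∈ S.map (fun sentence => (PySem.List.pyGet? sentence 0).getD "") := by
      rw [← hf0]
      exact List.mem_map_of_mem hs
    simpa [List.elem_iff] using this
  have hset : PySem.Set.contains
      (S.foldl (fun acc sentence => PySem.Set.update acc (PySem.List.slice sentence (some 1) none)) PySem.Set.empty) h
      = S.any (fun s => s.tail.contains h) := by
    simp only [PySem.List.slice_from_one]
    rw [show (PySem.Set.contains
        (S.foldl (fun acc sentence => PySem.Set.update acc sentence.tail) PySem.Set.empty) h)
      = ((S.foldl (fun acc sentence => PySem.Set.update acc sentence.tail) PySem.Set.empty).contains h) from rfl]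
    rw [pvTailWords_contains]
    rfl
  have hsetD : PySem.List.pySetD (h :: t) 0 (PySem.Str.lower h) = PySem.Str.lower h :: t := by
    have h0 : ((0:Nat):Int) = (0:Int) := by norm_num
    rw [← h0, PySem.List.pySetD_natCast]
    rfl
  simp only [Function.comp, pvG, hf0, hmem, Bool.and_true, hset, hsetD, pvP]
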